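-- pv_equiv track=rewrite | github.com/Gayatribhosale2610/Infytq_python | generate_ticket_number.py | generate_ticket
-- ===== SOURCE A (Python) =====
-- def generate_ticket(airline,source,destination,no_of_passengers):
--     ticket_number_list=[]
--     numbers = []
--     passengers = 100
--     total = no_of_passengers
--
--     while (no_of_passengers > 0):
--         passenger = passengers + 1
--         numbers.append(passenger)
--         no_of_passengers -= 1
--         passengers+=1
--
--     if total < 5:
--         for i in numbers:
--             result = airline + ":" + source[:3] + ":" + destination[:3] + ":" + str(i)
--             ticket_number_list.append(result)
--     else:
--         for i in numbers[-5:]: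
--             result = airline + ":" + source[:3] + ":" + destination[:3] + ":" + str(i)
--             ticket_number_list.append(result)
--     return ticket_number_list
-- ===== SOURCE B (Python) =====
-- def generate_ticket(airline, source, destination, no_of_passengers):
--     prefix = airline + ":" + source[:3] + ":" + destination[:3] + ":"
--     start = 101 if no_of_passengers < 5 else no_of_passengers + 96
--     return [prefix + str(k) for k in range(start, no_of_passengers + 101)]
-- ===== Notes on version B (the rewrite author's own statement) =====
-- stated objective: faster
-- what changed: B computes the needed passenger-number range (101..n+100, or the last 5 for n>=5) directly with range() arithmetic and a precomputed prefix, instead of building the full n-element number list in a while loop and slicing it.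
import Mathlib
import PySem

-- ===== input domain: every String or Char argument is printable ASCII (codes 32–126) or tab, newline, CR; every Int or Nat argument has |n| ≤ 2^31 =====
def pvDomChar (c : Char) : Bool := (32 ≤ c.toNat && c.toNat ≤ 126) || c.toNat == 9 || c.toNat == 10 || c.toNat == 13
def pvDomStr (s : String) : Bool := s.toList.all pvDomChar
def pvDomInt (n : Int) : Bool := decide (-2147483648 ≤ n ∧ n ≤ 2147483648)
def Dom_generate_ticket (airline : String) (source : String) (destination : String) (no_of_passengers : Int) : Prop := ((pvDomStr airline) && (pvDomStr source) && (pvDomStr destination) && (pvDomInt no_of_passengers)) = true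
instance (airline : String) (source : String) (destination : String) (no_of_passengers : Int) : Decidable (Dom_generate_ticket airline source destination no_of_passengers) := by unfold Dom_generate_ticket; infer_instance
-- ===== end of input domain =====

-- B replaces A's O(n) while-loop list build + slice by direct range arithmetic (faster, asymptotic).


-- ===== PORT A =====
-- the while loop: appends passengers+1, decrements counter, increments passengers
-- (tail-recursive: 'numbers' is carried reversed in acc and reversed once at loop exit)
def pvBuildNumbers (n : Int) (passengers : Int) (acc : List Int) : List Int :=
  if n > 0 then pvBuildNumbers (n - 1) (passengers + 1) ((passengers + 1) :: acc) else acc.reverse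
termination_by n.toNat
decreasing_by omega

def generate_ticket (airline : String) (source : String) (destination : String) (no_of_passengers : Int) : List String :=
  let numbers := pvBuildNumbers no_of_passengers 100 []
  let total := no_of_passengers
  if total < 5 then
    numbers.map (fun i => airline ++ ":" ++ PySem.Str.slice source none (some 3) ++ ":" ++ PySem.Str.slice destination none (some 3) ++ ":" ++ PySem.Int.toStr i)
  else
    (PySem.List.slice numbers (some (-5)) none).map (fun i => airline ++ ":" ++ PySem.Str.slice source none (some 3) ++ ":" ++ PySem.Str.slice destination none (some 3) ++ ":" ++ PySem.Int.toStr i)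

-- ===== PORT B =====
def generate_ticket_alt (airline : String) (source : String) (destination : String) (no_of_passengers : Int) : List String :=
  let pref := airline ++ ":" ++ PySem.Str.slice source none (some 3) ++ ":" ++ PySem.Str.slice destination none (some 3) ++ ":"
  let start := if no_of_passengers < 5 then 101 else no_of_passengers + 96
  (PySem.List.pyRange start (no_of_passengers + 101) 1).map (fun k => pref ++ PySem.Int.toStr k)

-- ===== PRECONDITION & SPEC =====
def Spec_generate_ticket (airline : String) (source : String) (destination : String) (no_of_passengers : Int) (out : List String) : Prop := out = generate_ticket_alt airline source destination no_of_passengers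
instance (airline : String) (source : String) (destination : String) (no_of_passengers : Int) (out : List String) : Decidable (Spec_generate_ticket airline source destination no_of_passengers out) := by unfold Spec_generate_ticket; infer_instance

-- ===== CLAIM (what is proved, stated in full; the proofs are below) =====
def Claim_equal_generate_ticket : Prop := ∀ (airline : String) (source : String) (destination : String) (no_of_passengers : Int), Dom_generate_ticket airline source destination no_of_passengers → Spec_generate_ticket airline source destination no_of_passengers (generate_ticket airline source destination no_of_passengers)

-- ===== LEMMAS AND PROOFS =====
theorem pvBuildNumbers_acc (n p : Int) (acc : List Int) :
    pvBuildNumbers n p acc = acc.reverse ++ PySem.List.pyRange (p + 1) (p + 1 + n) 1 := by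
  induction hk : n.toNat generalizing n p acc with
  | zero =>
    rw [pvBuildNumbers, if_neg (by omega), PySem.List.pyRange_one_eq_nil (by omega), List.append_nil]
  | succ k ih =>
    rw [pvBuildNumbers, if_pos (by omega), ih (n - 1) (p + 1) _ (by omega),
      PySem.List.pyRange_one_cons (by omega : p + 1 < p + 1 + n)]
    have h : p + 1 + 1 + (n - 1) = p + 1 + n := by omega
    rw [h]
    simp

theorem pvBuildNumbers_eq_pyRange (n p : Int) :
    pvBuildNumbers n p [] = PySem.List.pyRange (p + 1) (p + 1 + n) 1 := by
  rw [pvBuildNumbers_acc]; rfl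

theorem generate_ticket_eq (airline source destination : String) (n : Int) :
    generate_ticket airline source destination n = generate_ticket_alt airline source destination n := by
  unfold generate_ticket generate_ticket_alt
  simp only [pvBuildNumbers_eq_pyRange]
  have h0 : (100 : Int) + 1 = 101 := by norm_num
  have h2 : (101 : Int) + n = n + 101 := by omega
  by_cases h : n < 5
  · rw [if_pos h, if_pos h, h0, h2]
  · rw [if_neg h, if_neg h]
    have hsplit : PySem.List.pyRange 101 (n + 101) 1
        = PySem.List.pyRange 101 (n + 96) 1 ++ PySem.List.pyRange (n + 96) (n + 101) 1 :=
      PySem.List.pyRange_one_append 101 (n + 96) (n + 101) (by omega) (by omega)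
    rw [h0, h2, hsplit, PySem.List.slice_from_neg_ofNat _ 5 (by norm_num)]
    have hlen : ((PySem.List.pyRange 101 (n + 96) 1 ++ PySem.List.pyRange (n + 96) (n + 101) 1).length
        - 5) = (PySem.List.pyRange 101 (n + 96) 1).length := by
      simp [PySem.List.length_pyRange_one]
    rw [hlen, List.drop_left]

-- ===== VERDICT (by name: the statement is the Claim_ definition above) =====
theorem generate_ticket_spec : Claim_equal_generate_ticket := by
  intro airline source destination n _
  unfold Spec_generate_ticket
  exact generate_ticket_eq airline source destination n
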